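-- pv_equiv track=rewrite | github.com/NOAA-OWP/t-route | build/lib/troute-network/troute/nhd_network.py | reachable_network
-- ===== SOURCE A (Python) =====
-- from collections import defaultdict, Counter, deque
-- from itertools import chain
-- from functools import reduce, partial
--
-- def headwaters(N):
--     '''
--     Find network headwater segments
--
--     Arguments
--     ---------
--     N (dict, int: [int]): Network connections graph
--
--     Returns
--     -------
--     (iterable): headwater segments
--
--     Notes
--     -----
--     - If reverse connections graph is handed as input, then function
--       will return network tailwaters.
--
--     '''
--     return N.keys() - chain.from_iterable(N.values())
--
-- def reachable(N, sources=None, targets=None):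
--     """
--     Return segments reachable from sources.
--
--     Arguments:
--     ----------
--     N (dict, int: [int]): Reverse network connections
--     sources (iterable): Segments from which to start searches.
--                         If none, network tailwaters are used
--     targets (iterable): Target segments to stop searching.
--
--     Returns:
--     rv (dict, int: set(int)): Segments reachble from sources. Sources are dictionary keys,
--                               reachable segments are dictionary values.
--
--     """
--     if sources is None:
--         sources = headwaters(N)
--
--     rv = {}
--     if targets is None:
--         for h in sources:
--             reach = set()
--             Q = deque([h])
--             while Q:
--                 x = Q.popleft()
--                 reach.add(x)
--                 Q.extend(N.get(x, ()))
--             rv[h] = reach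
--     else:
--         targets = set(targets)
--
--         for h in sources:
--             reach = set()
--             Q = deque([h])
--             while Q:
--                 x = Q.popleft()
--                 reach.add(x)
--                 if x not in targets:
--                     Q.extend(N.get(x, ()))
--             rv[h] = reach
--     return rv
--
-- def reachable_network(N, sources=None, targets=None, check_disjoint=True):
--     """
--     Return subnetworks generated by reach
--     Arguments:
--     ----------
--     N (dict, int: [int]): Reverse network connections dictionary
--     sources (iterable): Segments to begin search from. If None, source nodes are used.
--     targets (iterable): Target nodes to stop searching
--     check_disjoint (bool):
--
--     Returns:
--     --------
--     rv (dict, {int, {int: [int]}}): Reverse connections dictionary for each independent network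
--                                     highest level key is the network tailwater id.
--
--     """
--     # identify all segments reachable from each terminal segment (e.g. tailwater)
--     reached = reachable(N, sources=sources, targets=targets)
--
--     # check network connectivity
--     if (
--         check_disjoint
--         and len(reached) > 1
--         and reduce(set.intersection, reached.values())
--     ):
--         raise ValueError("Networks not disjoint")
--
--     rv = {}
--     for k, n in reached.items():
--         rv[k] = {m: N.get(m, []) for m in n}
--     return rv
-- ===== SOURCE B (Python) =====
-- from collections import Counter
-- from itertools import chain
--
--
-- def reachable_network(N, sources=None, targets=None, check_disjoint=True):
--     """Level-synchronous frontier expansion (no deque, no per-node queue ops):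
--     each round processes a whole frontier list, recording every frontier node's
--     adjacency in the subnetwork dict and concatenating the next frontier; the
--     disjointness test counts key occurrences across the built subnetworks
--     instead of intersecting reach sets."""
--     if sources is None:
--         sources = N.keys() - set(chain.from_iterable(N.values()))
--     blocked = set(targets) if targets is not None else frozenset()
--
--     rv = {}
--     for h in sources:
--         net = {}
--         frontier = [h]
--         while frontier:
--             nxt = []
--             for x in frontier:
--                 adj = N.get(x, [])
--                 net[x] = adj
--                 if x not in blocked:
--                     nxt.extend(adj)
--             frontier = nxt
--         rv[h] = net
--
--     if check_disjoint and len(rv) > 1: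
--         counts = Counter(chain.from_iterable(rv.values()))
--         if any(c == len(rv) for c in counts.values()):
--             raise ValueError("Networks not disjoint")
--     return rv
-- ===== Notes on version B (the rewrite author's own statement) =====
-- stated objective: alternative
-- what changed: Replaces the per-node deque traversal of the reachable() helper plus a second subnetwork-building loop with a level-synchronous frontier expansion that records each frontier node's adjacency directly into the subnetwork dict while producing the next frontier list, and replaces the reduce(set.intersection) disjointness test with a Counter over the built subnetworks' keys (an element common to all networks iff its count equals the number of networks).
import Mathlib
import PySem

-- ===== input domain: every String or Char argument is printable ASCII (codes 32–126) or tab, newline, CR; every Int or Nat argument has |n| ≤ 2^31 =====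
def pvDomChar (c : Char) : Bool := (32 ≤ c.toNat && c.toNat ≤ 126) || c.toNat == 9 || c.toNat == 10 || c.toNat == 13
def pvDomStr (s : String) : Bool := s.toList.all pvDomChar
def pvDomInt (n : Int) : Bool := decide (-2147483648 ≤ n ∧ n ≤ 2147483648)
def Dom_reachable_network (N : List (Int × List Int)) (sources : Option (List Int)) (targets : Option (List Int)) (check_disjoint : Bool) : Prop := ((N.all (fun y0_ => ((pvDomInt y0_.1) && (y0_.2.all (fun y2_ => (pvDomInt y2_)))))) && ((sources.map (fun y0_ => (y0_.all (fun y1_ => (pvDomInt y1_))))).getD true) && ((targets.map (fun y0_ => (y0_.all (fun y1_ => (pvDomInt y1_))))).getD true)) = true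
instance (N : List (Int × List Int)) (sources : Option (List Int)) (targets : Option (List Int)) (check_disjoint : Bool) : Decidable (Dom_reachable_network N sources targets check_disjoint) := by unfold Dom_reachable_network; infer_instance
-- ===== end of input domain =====

-- B replaces A's per-node deque traversal (reachable helper + second building loop) with a
-- level-synchronous frontier expansion that records each frontier node's adjacency into the
-- subnetwork dict while producing the next frontier, and a counting-based disjointness test.

-- ===== PORT A =====
-- N.get(x, []) / N.get(x, ()) — first-match association lookup (shared by both ports)
def rn_get (N : List (Int × List Int)) (x : Int) : List Int :=
  (PySem.Dict.mk N).getD x []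

def rn_sumlen (N : List (Int × List Int)) : Nat :=
  (N.map (fun p => p.2.length)).sum

-- termination fuel for the while-loops (Python's loops are unbounded; on every input admitted by
-- Pre_ the search terminates and this bound dominates both the number of pops of A's deque loop
-- and the number of rounds of B's frontier loop, so each port computes its Python's value there)
def rn_fuel (N : List (Int × List Int)) : Nat :=
  (rn_sumlen N + 2) ^ (N.length + rn_sumlen N + 2)

-- headwaters(N) = N.keys() - chain.from_iterable(N.values())
def rn_headwaters (N : List (Int × List Int)) : List Int :=
  PySem.Set.diff (PySem.Set.ofList (N.map Prod.fst)) (N.flatMap Prod.snd)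

-- the targets-is-None BFS loop of `reachable`
def rn_bfs_nt (N : List (Int × List Int)) : Nat → List Int → PySem.Set Int → PySem.Set Int
  | 0, _, reach => reach
  | _ + 1, [], reach => reach
  | f + 1, x :: Q, reach =>
      rn_bfs_nt N f (Q ++ rn_get N x) (PySem.Set.add reach x)

-- the targets-given BFS loop of `reachable`
def rn_bfs_t (N : List (Int × List Int)) (tset : PySem.Set Int) : Nat → List Int → PySem.Set Int → PySem.Set Int
  | 0, _, reach => reach
  | _ + 1, [], reach => reach
  | f + 1, x :: Q, reach =>
      rn_bfs_t N tset f (if PySem.Set.contains tset x then Q else Q ++ rn_get N x) (PySem.Set.add reach x)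

-- reachable(N, sources, targets)
def rn_reachable (N : List (Int × List Int)) (sources : Option (List Int)) (targets : Option (List Int)) : PySem.Dict Int (PySem.Set Int) :=
  let srcs := match sources with
    | none => rn_headwaters N
    | some s => s
  match targets with
  | none =>
      srcs.foldl (fun rv h => rv.insert h (rn_bfs_nt N (rn_fuel N) [h] PySem.Set.empty)) PySem.Dict.empty
  | some ts =>
      let tset : PySem.Set Int := PySem.Set.ofList ts
      srcs.foldl (fun rv h => rv.insert h (rn_bfs_t N tset (rn_fuel N) [h] PySem.Set.empty)) PySem.Dict.empty

-- A's ValueError "Networks not disjoint" has no value of the return type; Pre_ excludes exactly those inputs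
def reachable_network (N : List (Int × List Int)) (sources : Option (List Int)) (targets : Option (List Int)) (check_disjoint : Bool) : List (Int × List (Int × List Int)) :=
  let reached := rn_reachable N sources targets
  (reached.items.foldl
    (fun rv kn => rv.insert kn.1 ((kn.2.foldl (fun d m => d.insert m (rn_get N m)) PySem.Dict.empty).items))
    (PySem.Dict.empty : PySem.Dict Int (List (Int × List Int)))).items

-- ===== PORT B =====
-- one level-synchronous round loop: each round walks the frontier once, storing every frontier
-- node's adjacency in the subnetwork dict and concatenating the next frontier
def rnb_level (N : List (Int × List Int)) (tset : PySem.Set Int) : Nat → List Int → PySem.Dict Int (List Int) → PySem.Dict Int (List Int)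
  | 0, _, net => net
  | g + 1, L, net =>
      if L = [] then net
      else
        let st := L.foldl
          (fun (p : PySem.Dict Int (List Int) × List Int) x =>
            let adj := rn_get N x
            (p.1.insert x adj, if PySem.Set.contains tset x then p.2 else p.2 ++ adj))
          (net, [])
        rnb_level N tset g st.2 st.1

def reachable_network_alt (N : List (Int × List Int)) (sources : Option (List Int)) (targets : Option (List Int)) (check_disjoint : Bool) : List (Int × List (Int × List Int)) :=
  let srcs := match sources with
    | none => PySem.Set.diff (PySem.Set.ofList (N.map Prod.fst)) (N.flatMap Prod.snd)
    | some s => s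
  let tset : PySem.Set Int := match targets with
    | some ts => PySem.Set.ofList ts
    | none => PySem.Set.empty
  (srcs.foldl (fun rv h => rv.insert h (rnb_level N tset (rn_fuel N) [h] PySem.Dict.empty).items)
    (PySem.Dict.empty : PySem.Dict Int (List (Int × List Int)))).items

-- ===== PRECONDITION & SPEC =====
-- closed-form graph notions for Pre_ (independent of both ports)
def pvLookup (N : List (Int × List Int)) (x : Int) : List Int :=
  match N.find? (fun p => p.1 == x) with
  | some p => p.2
  | none => []

def pvNodes (N : List (Int × List Int)) : List Int :=
  PySem.Set.ofList (N.map Prod.fst ++ N.flatMap Prod.snd)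

-- successors actually followed by the search: none out of a target node
def pvSucc (N : List (Int × List Int)) (targets : Option (List Int)) (x : Int) : List Int :=
  match targets with
  | none => pvLookup N x
  | some ts => if x ∈ ts then [] else pvLookup N x

def pvStep (sux : Int → List Int) (S : List Int) : List Int :=
  PySem.Set.update S (S.flatMap sux)

-- closure of a start set under sux (the saturation fixpoint is reached within the iteration bound)
def pvClF (sux : Int → List Int) (m : Nat) (L : List Int) : List Int :=
  (pvStep sux)^[m] L

def pvCl (N : List (Int × List Int)) (targets : Option (List Int)) (L : List Int) : List Int :=
  pvClF (pvSucc N targets) ((pvNodes N).length + 1) L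

def pvSrcs (N : List (Int × List Int)) (sources : Option (List Int)) : List Int :=
  match sources with
  | none => PySem.Set.diff (PySem.Set.ofList (N.map Prod.fst)) (N.flatMap Prod.snd)
  | some s => s

-- Pre_ excludes exactly the inputs on which Python A does not return: (i) those where the search
-- never terminates (a cycle of followed edges is reachable from some source), and (ii) those where
-- A raises ValueError("Networks not disjoint") — check_disjoint set, more than one network, and
-- some segment common to all of them.
def Pre_reachable_network (N : List (Int × List Int)) (sources : Option (List Int)) (targets : Option (List Int)) (check_disjoint : Bool) : Prop :=
  (∀ h ∈ pvSrcs N sources, ∀ x ∈ pvCl N targets [h],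
      x ∉ pvCl N targets (PySem.Set.ofList (pvSucc N targets x))) ∧
  ¬ (check_disjoint = true ∧ 1 < (PySem.Set.ofList (pvSrcs N sources)).length ∧
      ∃ m ∈ pvNodes N ++ pvSrcs N sources, ∀ h ∈ pvSrcs N sources, m ∈ pvCl N targets [h])

instance (N : List (Int × List Int)) (sources : Option (List Int)) (targets : Option (List Int)) (check_disjoint : Bool) : Decidable (Pre_reachable_network N sources targets check_disjoint) := by
  unfold Pre_reachable_network; infer_instance

def pvWitness_reachable_network : (List (Int × List Int)) × Option (List Int) × Option (List Int) × Bool :=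
  ([(1, [2]), (3, [4])], none, none, true)

def Spec_reachable_network (N : List (Int × List Int)) (sources : Option (List Int)) (targets : Option (List Int)) (check_disjoint : Bool) (out : List (Int × List (Int × List Int))) : Prop := out = reachable_network_alt N sources targets check_disjoint
instance (N : List (Int × List Int)) (sources : Option (List Int)) (targets : Option (List Int)) (check_disjoint : Bool) (out : List (Int × List (Int × List Int))) : Decidable (Spec_reachable_network N sources targets check_disjoint out) := by unfold Spec_reachable_network; infer_instance

-- ===== CLAIM (what is proved, stated in full; the proofs are below) =====
def Claim_equal_reachable_network : Prop := ∀ (N : List (Int × List Int)) (sources : Option (List Int)) (targets : Option (List Int)) (check_disjoint : Bool), Dom_reachable_network N sources targets check_disjoint → Pre_reachable_network N sources targets check_disjoint → Spec_reachable_network N sources targets check_disjoint (reachable_network N sources targets check_disjoint)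

-- ===== LEMMAS AND PROOFS =====

-- ---------- generic BFS machinery ----------

-- A's deque loop, with an arbitrary followed-successor function
def bfsU (sux : Int → List Int) : Nat → List Int → PySem.Set Int → PySem.Set Int
  | 0, _, reach => reach
  | _ + 1, [], reach => reach
  | f + 1, x :: Q, reach => bfsU sux f (Q ++ sux x) (PySem.Set.add reach x)

-- the concatenation of the frontier levels
def lvlSeq (sux : Int → List Int) : Nat → List Int → List Int
  | 0, _ => []
  | g + 1, L => if L = [] then [] else L ++ lvlSeq sux g (L.flatMap sux)

def pot (c : Nat) (rk : Int → Nat) (L : List Int) : Nat := (L.map (fun x => c ^ rk x)).sum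

def mrank (rk : Int → Nat) (L : List Int) : Nat := (L.map (fun x => rk x + 1)).foldr max 0

lemma bfsU_nil (sux : Int → List Int) (f : Nat) (r : PySem.Set Int) : bfsU sux f [] r = r := by
  cases f <;> rfl

lemma lvlSeq_nil (sux : Int → List Int) (g : Nat) : lvlSeq sux g [] = [] := by
  cases g <;> simp [lvlSeq]

-- FIFO compositionality: popping a whole block L appends all its successors and adds L in order
lemma bfsU_block (sux : Int → List Int) :
    ∀ (L R : List Int) (r : PySem.Set Int) (f : Nat),
      bfsU sux (f + L.length) (L ++ R) r = bfsU sux f (R ++ L.flatMap sux) (PySem.Set.update r L)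
  | [], R, r, f => by simp [PySem.Set.update_nil]
  | x :: L, R, r, f => by
      have h1 : f + (x :: L).length = (f + L.length) + 1 := by simp [List.length_cons]; omega
      rw [h1]
      show bfsU sux ((f + L.length) + 1) (x :: (L ++ R)) r = _
      rw [show bfsU sux ((f + L.length) + 1) (x :: (L ++ R)) r
            = bfsU sux (f + L.length) ((L ++ R) ++ sux x) (PySem.Set.add r x) from rfl]
      rw [List.append_assoc, bfsU_block sux L (R ++ sux x) (PySem.Set.add r x) f]
      rw [List.append_assoc, PySem.Set.update_cons]
      simp [List.flatMap_cons]

lemma mrank_le_of_forall (rk : Int → Nat) (L : List Int) (b : Nat)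
    (h : ∀ x ∈ L, rk x + 1 ≤ b) : mrank rk L ≤ b := by
  induction L with
  | nil => simp [mrank]
  | cons x L ih =>
      simp only [mrank, List.map_cons, List.foldr_cons]
      exact max_le (h x (by simp)) (ih (fun y hy => h y (by simp [hy])))

lemma le_mrank_of_mem (rk : Int → Nat) (L : List Int) (x : Int) (hx : x ∈ L) :
    rk x + 1 ≤ mrank rk L := by
  induction L with
  | nil => cases hx
  | cons y L ih =>
      simp only [mrank, List.map_cons, List.foldr_cons]
      rcases List.mem_cons.1 hx with h | h
      · subst h; exact le_max_left _ _
      · exact le_trans (ih h) (le_max_right _ _)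

lemma mrank_eq_zero_iff (rk : Int → Nat) (L : List Int) : mrank rk L = 0 ↔ L = [] := by
  cases L with
  | nil => simp [mrank]
  | cons x L =>
      constructor
      · intro h
        have := le_mrank_of_mem rk (x :: L) x (by simp)
        omega
      · intro h; cases h

lemma len_le_pot (c : Nat) (rk : Int → Nat) (L : List Int) (hc : 1 ≤ c) :
    L.length ≤ pot c rk L := by
  induction L with
  | nil => simp [pot]
  | cons x L ih =>
      have : 1 ≤ c ^ rk x := Nat.one_le_pow _ _ (by omega)
      simp only [pot, List.map_cons, List.sum_cons, List.length_cons]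
      simp only [pot] at ih
      omega

lemma pot_append (c : Nat) (rk : Int → Nat) (L M : List Int) :
    pot c rk (L ++ M) = pot c rk L + pot c rk M := by
  simp [pot]

lemma pot_flat_le (c : Nat) (rk : Int → Nat) (sux : Int → List Int) (L : List Int) (hc : 2 ≤ c)
    (hL : ∀ x ∈ L, (∀ y ∈ sux x, rk y < rk x) ∧ (sux x).length ≤ c - 2) :
    pot c rk (L.flatMap sux) + L.length ≤ pot c rk L := by
  induction L with
  | nil => simp [pot]
  | cons x L ih =>
      rw [List.flatMap_cons, pot_append]
      have hx := hL x (by simp)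
      have hone : pot c rk (sux x) + 1 ≤ c ^ rk x := by
        rcases Nat.eq_zero_or_pos (rk x) with h0 | hpos
        · have : sux x = [] := by
            cases hsx : sux x with
            | nil => rfl
            | cons y ys =>
                have := hx.1 y (by rw [hsx]; simp)
                omega
          simp [this, pot, h0]
        · obtain ⟨r, hr⟩ : ∃ r, rk x = r + 1 := ⟨rk x - 1, by omega⟩
          rw [hr]
          have hbound : ∀ v ∈ (sux x).map (fun y => c ^ rk y), v ≤ c ^ r := by
            intro v hv
            rcases List.mem_map.1 hv with ⟨y, hy, rfl⟩
            exact Nat.pow_le_pow_right (by omega) (by have := hx.1 y hy; omega)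
          have hsum : pot c rk (sux x) ≤ (sux x).length * c ^ r := by
            calc pot c rk (sux x) ≤ ((sux x).map (fun y => c ^ rk y)).length • (c ^ r) :=
                  List.sum_le_card_nsmul _ _ hbound
            _ = (sux x).length * c ^ r := by simp [smul_eq_mul]
          have hlen : (sux x).length * c ^ r ≤ (c - 2) * c ^ r :=
            Nat.mul_le_mul_right _ hx.2
          have hcpos : 1 ≤ c ^ r := Nat.one_le_pow _ _ (by omega)
          have : (c - 2) * c ^ r + 2 * c ^ r = c ^ (r + 1) := by
            rw [pow_succ]
            have : (c - 2) + 2 = c := by omega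
            calc (c - 2) * c ^ r + 2 * c ^ r = ((c - 2) + 2) * c ^ r := by ring
            _ = c * c ^ r := by rw [this]
            _ = c ^ r * c := by ring
          omega
      have ihh := ih (fun y hy => hL y (by simp [hy]))
      simp only [pot, List.map_cons, List.sum_cons, List.length_cons]
      simp only [pot] at hone ihh ⊢
      omega

-- the fueled deque loop computes the saturation by levels, given a rank that drops along sux
lemma bfsU_eq_lvlSeq (sux : Int → List Int) (rk : Int → Nat) (c : Nat) (P : Int → Prop)
    (hc : 2 ≤ c)
    (hP : ∀ x, P x → (∀ y ∈ sux x, P y ∧ rk y < rk x) ∧ (sux x).length ≤ c - 2) :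
    ∀ (g f : Nat) (L : List Int) (r : PySem.Set Int),
      (∀ x ∈ L, P x) → pot c rk L ≤ f → mrank rk L ≤ g →
      bfsU sux f L r = PySem.Set.update r (lvlSeq sux g L) := by
  intro g
  induction g with
  | zero =>
      intro f L r hPL hf hg
      have : L = [] := (mrank_eq_zero_iff rk L).1 (by omega)
      subst this
      rw [bfsU_nil, lvlSeq_nil, PySem.Set.update_nil]
  | succ g ih =>
      intro f L r hPL hf hg
      by_cases hL : L = []
      · subst hL
        rw [bfsU_nil, lvlSeq_nil, PySem.Set.update_nil]
      · have hlen : L.length ≤ f := le_trans (len_le_pot c rk L (by omega)) hf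
        have hfl : ∀ x ∈ L, (∀ y ∈ sux x, rk y < rk x) ∧ (sux x).length ≤ c - 2 := by
          intro x hx
          exact ⟨fun y hy => ((hP x (hPL x hx)).1 y hy).2, (hP x (hPL x hx)).2⟩
        have hsplit : f = (f - L.length) + L.length := by omega
        have hblock := bfsU_block sux L [] r (f - L.length)
        rw [List.append_nil, List.nil_append] at hblock
        rw [hsplit, hblock]
        have hPflat : ∀ y ∈ L.flatMap sux, P y := by
          intro y hy
          rcases List.mem_flatMap.1 hy with ⟨x, hx, hyx⟩
          exact ((hP x (hPL x hx)).1 y hyx).1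
        have hpotflat : pot c rk (L.flatMap sux) ≤ f - L.length := by
          have := pot_flat_le c rk sux L hc hfl
          omega
        have hmrflat : mrank rk (L.flatMap sux) ≤ g := by
          apply mrank_le_of_forall
          intro y hy
          rcases List.mem_flatMap.1 hy with ⟨x, hx, hyx⟩
          have h1 : rk y < rk x := ((hP x (hPL x hx)).1 y hyx).2
          have h2 : rk x + 1 ≤ mrank rk L := le_mrank_of_mem rk L x hx
          omega
        rw [ih (f - L.length) (L.flatMap sux) (PySem.Set.update r L) hPflat hpotflat hmrflat]
        rw [← PySem.Set.update_append]
        congr 1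
        show L ++ lvlSeq sux g (L.flatMap sux) = lvlSeq sux (g + 1) L
        simp [lvlSeq, hL]

-- ---------- closure and rank ----------

lemma prefix_add (s : PySem.Set Int) (x : Int) : s <+: PySem.Set.add s x := by
  rw [PySem.Set.add_eq_ite]
  split
  · exact List.prefix_refl s
  · exact List.prefix_append s [x]

lemma prefix_update (s : PySem.Set Int) (xs : List Int) : s <+: PySem.Set.update s xs := by
  induction xs generalizing s with
  | nil => rw [PySem.Set.update_nil]
  | cons x xs ih =>
      rw [PySem.Set.update_cons]
      exact List.IsPrefix.trans (prefix_add s x) (ih (PySem.Set.add s x))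

lemma prefix_pvStep (sux : Int → List Int) (S : List Int) : S <+: pvStep sux S :=
  prefix_update S (S.flatMap sux)

lemma prefix_iterate (sux : Int → List Int) (k : Nat) (S : List Int) :
    S <+: (pvStep sux)^[k] S := by
  induction k generalizing S with
  | zero => simp
  | succ k ih =>
      rw [Function.iterate_succ_apply]
      exact List.IsPrefix.trans (prefix_pvStep sux S) (ih (pvStep sux S))

lemma mem_pvClF_of_mem (sux : Int → List Int) (m : Nat) (L : List Int) (x : Int) (hx : x ∈ L) :
    x ∈ pvClF sux m L :=
  (prefix_iterate sux m L).subset hx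

lemma nodup_iterate (sux : Int → List Int) (k : Nat) (S : List Int) (hS : S.Nodup) :
    ((pvStep sux)^[k] S).Nodup := by
  induction k generalizing S with
  | zero => simpa
  | succ k ih =>
      rw [Function.iterate_succ_apply]
      exact ih _ (PySem.Set.nodup_update _ _ hS)

lemma mem_iterate_cases (sux : Int → List Int) (nodes : List Int)
    (hsux : ∀ x y, y ∈ sux x → y ∈ nodes) (k : Nat) (S : List Int) :
    ∀ z ∈ (pvStep sux)^[k] S, z ∈ S ∨ z ∈ nodes := by
  induction k generalizing S with
  | zero => intro z hz; exact Or.inl hz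
  | succ k ih =>
      intro z hz
      rw [Function.iterate_succ_apply'] at hz
      rcases (PySem.Set.mem_update _ _ _).1 hz with h | h
      · exact ih S z h
      · rcases List.mem_flatMap.1 h with ⟨x, _, hzx⟩
        exact Or.inr (hsux x z hzx)

lemma nodup_length_le (l S nodes : List Int) (hnd : l.Nodup)
    (h : ∀ z ∈ l, z ∈ S ∨ z ∈ nodes) : l.length ≤ S.length + nodes.length := by
  have h1 : l.length = l.toFinset.card := (List.toFinset_card_of_nodup hnd).symm
  have h2 : l.toFinset ⊆ S.toFinset ∪ nodes.toFinset := by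
    intro z hz
    rcases h z (List.mem_toFinset.1 hz) with hh | hh
    · exact Finset.mem_union_left _ (List.mem_toFinset.2 hh)
    · exact Finset.mem_union_right _ (List.mem_toFinset.2 hh)
  calc l.length = l.toFinset.card := h1
  _ ≤ (S.toFinset ∪ nodes.toFinset).card := Finset.card_le_card h2
  _ ≤ S.toFinset.card + nodes.toFinset.card := Finset.card_union_le _ _
  _ ≤ S.length + nodes.length := Nat.add_le_add (List.toFinset_card_le S) (List.toFinset_card_le nodes)

lemma iterate_fix_persists (sux : Int → List Int) (S : List Int)
    (hfix : pvStep sux S = S) (j : Nat) : (pvStep sux)^[j] S = S := by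
  induction j with
  | zero => rfl
  | succ j ih => rw [Function.iterate_succ_apply, hfix, ih]

-- within |nodes|+1 rounds the saturation reaches its fixpoint
lemma pvClF_fix (sux : Int → List Int) (nodes : List Int)
    (hsux : ∀ x y, y ∈ sux x → y ∈ nodes) (S : List Int) (hS : S.Nodup) :
    pvStep sux (pvClF sux (nodes.length + 1) S) = pvClF sux (nodes.length + 1) S := by
  set m := nodes.length + 1 with hm
  by_cases hex : ∃ k, k < m ∧ pvStep sux ((pvStep sux)^[k] S) = (pvStep sux)^[k] S
  · rcases hex with ⟨k, hk, hfix⟩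
    have : (pvStep sux)^[m] S = (pvStep sux)^[k] S := by
      have : m = k + (m - k) := by omega
      rw [this, Nat.add_comm, Function.iterate_add_apply]
      exact iterate_fix_persists sux _ hfix (m - k)
    unfold pvClF
    rw [this, hfix]
  · exfalso
    push_neg at hex
    have grow : ∀ k, k ≤ m → S.length + k ≤ ((pvStep sux)^[k] S).length := by
      intro k
      induction k with
      | zero => intro _; simp
      | succ k ih =>
          intro hk
          have hlt : k < m := by omega
          have hne := hex k hlt
          have hpre := prefix_pvStep sux ((pvStep sux)^[k] S)
          have hlelen := hpre.length_le
          have hstrict : ((pvStep sux)^[k] S).length < (pvStep sux ((pvStep sux)^[k] S)).length := by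
            rcases Nat.lt_or_ge ((pvStep sux)^[k] S).length (pvStep sux ((pvStep sux)^[k] S)).length with h | h
            · exact h
            · exfalso
              exact hne (hpre.eq_of_length (by omega)).symm
          have := ih (by omega)
          rw [Function.iterate_succ_apply']
          omega
    have hbound := nodup_length_le ((pvStep sux)^[m] S) S nodes
      (nodup_iterate sux m S hS) (mem_iterate_cases sux nodes hsux m S)
    have := grow m (le_refl m)
    omega

-- minimality: the closure is contained in any sux-closed superset of the start set
lemma pvClF_min (sux : Int → List Int) (m : Nat) (S : List Int) (T : List Int)
    (hT : ∀ x ∈ T, ∀ y ∈ sux x, y ∈ T) (hST : ∀ z ∈ S, z ∈ T) :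
    ∀ z ∈ pvClF sux m S, z ∈ T := by
  unfold pvClF
  induction m generalizing S with
  | zero => exact hST
  | succ m ih =>
      rw [Function.iterate_succ_apply]
      apply ih
      intro z hz
      rcases (PySem.Set.mem_update _ _ _).1 hz with h | h
      · exact hST z h
      · rcases List.mem_flatMap.1 h with ⟨x, hx, hzx⟩
        exact hT x (hST x hx) z hzx

-- ---------- instantiation to pvSucc ----------

lemma pvSucc_none (N : List (Int × List Int)) (x : Int) :
    pvSucc N none x = pvLookup N x := rfl

lemma pvSucc_some (N : List (Int × List Int)) (ts : List Int) (x : Int) :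
    pvSucc N (some ts) x = if x ∈ ts then [] else pvLookup N x := rfl

lemma sux_sub_nodes (N : List (Int × List Int)) (targets : Option (List Int)) :
    ∀ x y, y ∈ pvSucc N targets x → y ∈ pvNodes N := by
  intro x y hy
  have hlk : ∀ z, z ∈ pvLookup N x → z ∈ pvNodes N := by
    intro z hz
    unfold pvLookup at hz
    cases hfind : N.find? (fun p => p.1 == x) with
    | none => rw [hfind] at hz; cases hz
    | some p =>
        rw [hfind] at hz
        have hp : p ∈ N := List.mem_of_find?_eq_some hfind
        unfold pvNodes
        exact (PySem.Set.mem_ofList _ _).2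
          (List.mem_append_right _ (List.mem_flatMap.2 ⟨p, hp, hz⟩))
  cases targets with
  | none => rw [pvSucc_none] at hy; exact hlk y hy
  | some ts =>
      rw [pvSucc_some] at hy
      by_cases hx : x ∈ ts
      · simp [hx] at hy
      · rw [if_neg hx] at hy
        exact hlk y hy

lemma pvCl_closed (N : List (Int × List Int)) (targets : Option (List Int)) (S : List Int)
    (hS : S.Nodup) :
    ∀ x ∈ pvCl N targets S, ∀ y ∈ pvSucc N targets x, y ∈ pvCl N targets S := by
  intro x hx y hy
  have hfix := pvClF_fix (pvSucc N targets) (pvNodes N) (sux_sub_nodes N targets) S hS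
  unfold pvCl
  rw [← hfix]
  unfold pvStep
  exact (PySem.Set.mem_update _ _ _).2 (Or.inr (List.mem_flatMap.2 ⟨x, hx, hy⟩))

lemma pvCl_subset (N : List (Int × List Int)) (targets : Option (List Int)) (S T : List Int)
    (hT : T.Nodup) (hST : ∀ z ∈ S, z ∈ pvCl N targets T) :
    ∀ z ∈ pvCl N targets S, z ∈ pvCl N targets T :=
  pvClF_min (pvSucc N targets) _ S (pvCl N targets T) (pvCl_closed N targets T hT) hST

-- rank: the size of the closure of a single node; it drops along followed edges on acyclic inputs
lemma rn_rank_lt (N : List (Int × List Int)) (targets : Option (List Int)) (x y : Int)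
    (hy : y ∈ pvSucc N targets x)
    (hacyc : x ∉ pvCl N targets (PySem.Set.ofList (pvSucc N targets x))) :
    (pvCl N targets [y]).length < (pvCl N targets [x]).length := by
  have hysub : ∀ z ∈ pvCl N targets [y], z ∈ pvCl N targets [x] := by
    apply pvCl_subset N targets [y] [x] (by simp)
    intro z hz
    simp only [List.mem_singleton] at hz
    rw [hz]
    exact pvCl_closed N targets [x] (by simp) x (mem_pvClF_of_mem _ _ _ x (by simp)) y hy
  have hxny : x ∉ pvCl N targets [y] := by
    intro hx
    apply hacyc
    have : ∀ z ∈ pvCl N targets [y], z ∈ pvCl N targets (PySem.Set.ofList (pvSucc N targets x)) := by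
      apply pvCl_subset N targets [y] (PySem.Set.ofList (pvSucc N targets x)) (PySem.Set.nodup_ofList _)
      intro z hz
      simp only [List.mem_singleton] at hz
      rw [hz]
      exact mem_pvClF_of_mem _ _ _ y ((PySem.Set.mem_ofList _ _).2 hy)
    exact this x hx
  have hndy : (pvCl N targets [y]).Nodup := nodup_iterate _ _ _ (by simp)
  have hndx : (pvCl N targets [x]).Nodup := nodup_iterate _ _ _ (by simp)
  have hssub : (pvCl N targets [y]).toFinset ⊂ (pvCl N targets [x]).toFinset := by
    constructor
    · intro z hz
      exact List.mem_toFinset.2 (hysub z (List.mem_toFinset.1 hz))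
    · intro hsub
      exact hxny (List.mem_toFinset.1 (hsub (List.mem_toFinset.2
        (mem_pvClF_of_mem _ _ _ x (by simp)))))
  calc (pvCl N targets [y]).length = (pvCl N targets [y]).toFinset.card :=
        (List.toFinset_card_of_nodup hndy).symm
  _ < (pvCl N targets [x]).toFinset.card := Finset.card_lt_card hssub
  _ = (pvCl N targets [x]).length := List.toFinset_card_of_nodup hndx

lemma succ_len_le (N : List (Int × List Int)) (targets : Option (List Int)) (x : Int) :
    (pvSucc N targets x).length ≤ rn_sumlen N := by
  have hlk : (pvLookup N x).length ≤ rn_sumlen N := by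
    unfold pvLookup
    cases hfind : N.find? (fun p => p.1 == x) with
    | none => simp
    | some p =>
        have hp : p ∈ N := List.mem_of_find?_eq_some hfind
        unfold rn_sumlen
        exact List.le_sum_of_mem (List.mem_map.2 ⟨p, hp, rfl⟩)
  cases targets with
  | none => rw [pvSucc_none]; exact hlk
  | some ts =>
      rw [pvSucc_some]
      by_cases hx : x ∈ ts
      · simp [hx]
      · rw [if_neg hx]; exact hlk

lemma rn_rank_le (N : List (Int × List Int)) (targets : Option (List Int)) (h : Int) :
    (pvCl N targets [h]).length ≤ (pvNodes N).length + 1 := by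
  have := nodup_length_le (pvCl N targets [h]) [h] (pvNodes N)
    (nodup_iterate _ _ _ (by simp))
    (mem_iterate_cases (pvSucc N targets) (pvNodes N) (sux_sub_nodes N targets) _ [h])
  simpa [Nat.add_comm] using this

lemma nodes_len_le (N : List (Int × List Int)) :
    (pvNodes N).length ≤ N.length + rn_sumlen N := by
  unfold pvNodes
  calc (PySem.Set.ofList (N.map Prod.fst ++ N.flatMap Prod.snd)).length
      ≤ (N.map Prod.fst ++ N.flatMap Prod.snd).length := PySem.Set.length_ofList_le _
  _ = N.length + rn_sumlen N := by
      simp [List.length_append, List.length_flatMap, rn_sumlen, Function.comp]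

-- the per-source loop of A computes the level saturation (under the acyclicity hypothesis at h)
lemma bfsU_fuel_eq (N : List (Int × List Int)) (targets : Option (List Int)) (h : Int)
    (hacyc : ∀ x ∈ pvCl N targets [h],
      x ∉ pvCl N targets (PySem.Set.ofList (pvSucc N targets x))) :
    bfsU (pvSucc N targets) (rn_fuel N) [h] PySem.Set.empty
      = PySem.Set.update PySem.Set.empty (lvlSeq (pvSucc N targets) (rn_fuel N) [h]) := by
  refine bfsU_eq_lvlSeq (pvSucc N targets) (fun x => (pvCl N targets [x]).length)
    (rn_sumlen N + 2) (fun x => x ∈ pvCl N targets [h]) (by omega) ?_ (rn_fuel N) (rn_fuel N)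
    [h] PySem.Set.empty ?_ ?_ ?_
  · intro x hx
    constructor
    · intro y hy
      exact ⟨pvCl_closed N targets [h] (by simp) x hx y hy,
        rn_rank_lt N targets x y hy (hacyc x hx)⟩
    · have := succ_len_le N targets x
      omega
  · intro x hx
    simp only [List.mem_singleton] at hx
    rw [hx]
    exact mem_pvClF_of_mem _ _ _ h (by simp)
  · -- pot [h] = c ^ rk h ≤ fuel
    have h1 : (pvCl N targets [h]).length ≤ (pvNodes N).length + 1 := rn_rank_le N targets h
    have h2 : (pvNodes N).length + 1 ≤ N.length + rn_sumlen N + 1 := by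
      have := nodes_len_le N
      omega
    have h3 : (rn_sumlen N + 2) ^ (pvCl N targets [h]).length
        ≤ (rn_sumlen N + 2) ^ (N.length + rn_sumlen N + 2) :=
      Nat.pow_le_pow_right (by omega) (by omega)
    simp only [pot, List.map_cons, List.map_nil, List.sum_cons, List.sum_nil, Nat.add_zero]
    unfold rn_fuel
    omega
  · -- mrank [h] = rk h + 1 ≤ fuel
    have h1 : (pvCl N targets [h]).length ≤ (pvNodes N).length + 1 := rn_rank_le N targets h
    have h2 := nodes_len_le N
    have h3 : N.length + rn_sumlen N + 2 < (rn_sumlen N + 2) ^ (N.length + rn_sumlen N + 2) :=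
      Nat.lt_pow_self (by omega)
    simp only [mrank, List.map_cons, List.map_nil, List.foldr_cons, List.foldr_nil, Nat.max_zero]
    unfold rn_fuel
    omega

-- ---------- bridges from the ports' loops ----------

lemma rn_get_eq_pvLookup (N : List (Int × List Int)) (x : Int) :
    rn_get N x = pvLookup N x := by
  unfold rn_get pvLookup
  rw [PySem.Dict.getD_eq_get?_getD]
  induction N with
  | nil => rfl
  | cons p rest ih =>
      rw [PySem.Dict.get?_mk_cons, List.find?_cons]
      cases hpx : p.1 == x with
      | true => simp
      | false => simpa using ih

lemma bfs_nt_eq_bfsU (N : List (Int × List Int)) :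
    ∀ (f : Nat) (Q : List Int) (r : PySem.Set Int),
      rn_bfs_nt N f Q r = bfsU (pvSucc N none) f Q r
  | 0, _, _ => rfl
  | _ + 1, [], _ => rfl
  | f + 1, x :: Q, r => by
      show rn_bfs_nt N f (Q ++ rn_get N x) (PySem.Set.add r x)
        = bfsU (pvSucc N none) f (Q ++ pvSucc N none x) (PySem.Set.add r x)
      rw [show pvSucc N none x = pvLookup N x from rfl, ← rn_get_eq_pvLookup]
      exact bfs_nt_eq_bfsU N f (Q ++ rn_get N x) (PySem.Set.add r x)

lemma contains_ofList_eq (ts : List Int) (x : Int) :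
    PySem.Set.contains (PySem.Set.ofList ts) x = decide (x ∈ ts) := by
  by_cases hx : x ∈ ts
  · rw [(PySem.Set.contains_iff _ _).2 ((PySem.Set.mem_ofList _ _).2 hx)]
    simp [hx]
  · have hf : PySem.Set.contains (PySem.Set.ofList ts) x = false := by
      cases hb : PySem.Set.contains (PySem.Set.ofList ts) x
      · rfl
      · exact absurd ((PySem.Set.mem_ofList _ _).1 ((PySem.Set.contains_iff _ _).1 hb)) hx
    rw [hf]
    simp [hx]

lemma bfs_t_eq_bfsU (N : List (Int × List Int)) (ts : List Int) :
    ∀ (f : Nat) (Q : List Int) (r : PySem.Set Int),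
      rn_bfs_t N (PySem.Set.ofList ts) f Q r = bfsU (pvSucc N (some ts)) f Q r
  | 0, _, _ => rfl
  | _ + 1, [], _ => rfl
  | f + 1, x :: Q, r => by
      show rn_bfs_t N (PySem.Set.ofList ts) f
          (if PySem.Set.contains (PySem.Set.ofList ts) x then Q else Q ++ rn_get N x)
          (PySem.Set.add r x)
        = bfsU (pvSucc N (some ts)) f (Q ++ pvSucc N (some ts) x) (PySem.Set.add r x)
      rw [contains_ofList_eq ts x]
      by_cases hx : x ∈ ts
      · simp only [hx, decide_true, if_true]
        rw [pvSucc_some, if_pos hx, List.append_nil]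
        exact bfs_t_eq_bfsU N ts f Q (PySem.Set.add r x)
      · simp only [hx, decide_false, Bool.false_eq_true, if_false]
        rw [pvSucc_some, if_neg hx, ← rn_get_eq_pvLookup]
        exact bfs_t_eq_bfsU N ts f (Q ++ rn_get N x) (PySem.Set.add r x)

-- B's inner frontier walk splits into the dict fold and the concatenated next frontier
lemma rnb_inner_split (N : List (Int × List Int)) (tset : PySem.Set Int) :
    ∀ (L : List Int) (net : PySem.Dict Int (List Int)) (acc : List Int),
      L.foldl
        (fun (p : PySem.Dict Int (List Int) × List Int) x =>
          let adj := rn_get N x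
          (p.1.insert x adj, if PySem.Set.contains tset x then p.2 else p.2 ++ adj))
        (net, acc)
      = (L.foldl (fun d m => d.insert m (rn_get N m)) net,
         acc ++ L.flatMap (fun x => if PySem.Set.contains tset x then [] else rn_get N x))
  | [], net, acc => by simp
  | x :: L, net, acc => by
      rw [List.foldl_cons, List.foldl_cons]
      rw [rnb_inner_split N tset L (net.insert x (rn_get N x)) _]
      congr 1
      rw [List.flatMap_cons]
      by_cases hx : x ∈ tset <;> simp [hx]

-- the level loop of B is the dict fold over the level concatenation
lemma rnb_level_eq_foldl (N : List (Int × List Int)) (tset : PySem.Set Int) :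
    ∀ (g : Nat) (L : List Int) (net : PySem.Dict Int (List Int)),
      rnb_level N tset g L net
        = (lvlSeq (fun x => if PySem.Set.contains tset x then [] else rn_get N x) g L).foldl
            (fun d m => d.insert m (rn_get N m)) net
  | 0, L, net => by simp [rnb_level, lvlSeq]
  | g + 1, L, net => by
      by_cases hL : L = []
      · subst hL
        simp [rnb_level, lvlSeq]
      · show (if L = [] then net else _) = _
        rw [if_neg hL]
        simp only
        rw [rnb_inner_split N tset L net []]
        simp only [List.nil_append]
        rw [rnb_level_eq_foldl N tset g _ _]
        rw [show lvlSeq (fun x => if PySem.Set.contains tset x then [] else rn_get N x) (g + 1) L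
              = L ++ lvlSeq (fun x => if PySem.Set.contains tset x then [] else rn_get N x) g
                  (L.flatMap (fun x => if PySem.Set.contains tset x then [] else rn_get N x))
            from by simp [lvlSeq, hL]]
        rw [List.foldl_append]

-- the followed-successor function of B's loop is pvSucc
lemma suxB_none (N : List (Int × List Int)) :
    (fun x => if PySem.Set.contains PySem.Set.empty x then [] else rn_get N x) = pvSucc N none := by
  funext x
  have hf : PySem.Set.contains (PySem.Set.empty : PySem.Set Int) x = false := by
    cases hb : PySem.Set.contains (PySem.Set.empty : PySem.Set Int) x
    · rfl
    · exact absurd ((PySem.Set.contains_iff _ _).1 hb) (by simp [PySem.Set.empty])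
  rw [hf]
  simp only [Bool.false_eq_true, if_false]
  rw [rn_get_eq_pvLookup, pvSucc_none]

lemma suxB_some (N : List (Int × List Int)) (ts : List Int) :
    (fun x => if PySem.Set.contains (PySem.Set.ofList ts) x then [] else rn_get N x)
      = pvSucc N (some ts) := by
  funext x
  rw [contains_ofList_eq ts x, pvSucc_some]
  by_cases hx : x ∈ ts
  · simp [hx]
  · simp [hx, rn_get_eq_pvLookup]

-- ---------- dict-building glue (shared with A's output construction) ----------

lemma rn_empty_items {ν : Type} : (PySem.Dict.empty : PySem.Dict Int ν).items = [] := rfl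

-- inserting (x, N.get(x,[])) into a dict that is reach mapped through m ↦ (m, N.get(m,[]))
-- is Set.add on the reach side (overwrite-in-place rewrites the identical entry)
lemma rn_items_insert_map (N : List (Int × List Int)) (reach : List Int) (net : PySem.Dict Int (List Int)) (x : Int)
    (h : net.items = reach.map (fun m => (m, rn_get N m))) :
    (net.insert x (rn_get N x)).items = (PySem.Set.add reach x).map (fun m => (m, rn_get N m)) := by
  have hkeys : net.keys = reach := by
    simp only [PySem.Dict.keys, h, List.map_map]
    exact List.map_id' reach
  have hc : net.contains x = decide (x ∈ reach) := by
    rw [PySem.Dict.contains_eq_decide_mem_keys, hkeys]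
  by_cases hx : x ∈ reach
  · rw [PySem.Dict.items_insert_of_contains _ _ (by rw [hc]; simpa using hx), h, List.map_map,
      PySem.Set.add_eq_ite, if_pos hx]
    apply List.map_congr_left
    intro m _
    by_cases hmx : m = x
    · subst hmx; simp
    · simp [hmx]
  · rw [PySem.Dict.items_insert_of_not_contains _ _ (by rw [hc]; simpa using hx), h,
      PySem.Set.add_eq_ite, if_neg hx]
    simp

-- a fold of inserts over a node list n is Set.update on the reach side
lemma rn_foldl_insert_items (N : List (Int × List Int)) :
    ∀ (n : List Int) (s : List Int) (d : PySem.Dict Int (List Int)),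
    d.items = s.map (fun m => (m, rn_get N m)) →
    (n.foldl (fun d m => d.insert m (rn_get N m)) d).items
      = (PySem.Set.update s n).map (fun m => (m, rn_get N m))
  | [], s, d, h => by simpa [PySem.Set.update_nil] using h
  | x :: n, s, d, h => by
      rw [List.foldl_cons, PySem.Set.update_cons]
      exact rn_foldl_insert_items N n (PySem.Set.add s x) _ (rn_items_insert_map N s d x h)

-- A's dict comprehension over a duplicate-free n yields exactly n mapped through m ↦ (m, N.get(m,[]))
lemma rn_inner_items (N : List (Int × List Int)) (n : List Int) (hn : n.Nodup) :
    (n.foldl (fun d m => d.insert m (rn_get N m)) PySem.Dict.empty).items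
      = n.map (fun m => (m, rn_get N m)) := by
  have h := rn_foldl_insert_items N n [] PySem.Dict.empty rfl
  have h1 : PySem.Set.update ([] : PySem.Set Int) n = PySem.Set.ofList n := by
    rw [PySem.Set.ofList_eq_foldl]; rfl
  rw [h, h1, PySem.Set.ofList_eq_self_of_nodup n hn]

-- A's reach sets stay duplicate-free
lemma rn_bfs_nt_nodup (N : List (Int × List Int)) :
    ∀ (f : Nat) (Q : List Int) (reach : PySem.Set Int), reach.Nodup → (rn_bfs_nt N f Q reach).Nodup
  | 0, _, _, h => h
  | _ + 1, [], _, h => h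
  | f + 1, x :: Q, reach, h =>
      rn_bfs_nt_nodup N f (Q ++ rn_get N x) _ (PySem.Set.nodup_add reach x h)

lemma rn_bfs_t_nodup (N : List (Int × List Int)) (tset : PySem.Set Int) :
    ∀ (f : Nat) (Q : List Int) (reach : PySem.Set Int), reach.Nodup → (rn_bfs_t N tset f Q reach).Nodup
  | 0, _, _, h => h
  | _ + 1, [], _, h => h
  | f + 1, x :: Q, reach, h =>
      rn_bfs_t_nodup N tset f _ _ (PySem.Set.nodup_add reach x h)

-- inserting per-source values pointwise related by w keeps the items lists related by w
lemma rn_insert_items_w {α β : Type} (w : α → β) (d : PySem.Dict Int α) (d' : PySem.Dict Int β)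
    (k : Int) (a : α) (h : d'.items = d.items.map (fun kn => (kn.1, w kn.2))) :
    (d'.insert k (w a)).items = ((d.insert k a).items).map (fun kn => (kn.1, w kn.2)) := by
  have hkeys : d'.keys = d.keys := by
    simp [PySem.Dict.keys, h, List.map_map]
  have hc : d'.contains k = d.contains k := by
    rw [PySem.Dict.contains_eq_decide_mem_keys, PySem.Dict.contains_eq_decide_mem_keys, hkeys]
  by_cases hk : d.contains k = true
  · rw [PySem.Dict.items_insert_of_contains _ _ (hc.trans hk),
      PySem.Dict.items_insert_of_contains _ _ hk, h, List.map_map, List.map_map]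
    apply List.map_congr_left
    intro p _
    by_cases hp : p.1 = k <;> simp [hp]
  · have hk' : d.contains k = false := by simpa using hk
    rw [PySem.Dict.items_insert_of_not_contains _ _ (hc.trans hk'),
      PySem.Dict.items_insert_of_not_contains _ _ hk', h, List.map_append]
    simp

lemma rn_foldl_insert_w {α β : Type} (w : α → β) (u : Int → β) (v : Int → α) :
    ∀ (srcs : List Int), (∀ h ∈ srcs, u h = w (v h)) →
    ∀ (d : PySem.Dict Int α) (d' : PySem.Dict Int β),
    d'.items = d.items.map (fun kn => (kn.1, w kn.2)) →
    (srcs.foldl (fun rv h => rv.insert h (u h)) d').items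
      = (srcs.foldl (fun rv h => rv.insert h (v h)) d).items.map (fun kn => (kn.1, w kn.2))
  | [], _, d, d', h => h
  | s :: srcs, hu, d, d', h => by
      rw [List.foldl_cons, List.foldl_cons, hu s (by simp)]
      exact rn_foldl_insert_w w u v srcs (fun h hh => hu h (by simp [hh])) _ _
        (rn_insert_items_w w d d' s (v s) h)

-- every value stored by the per-source fold satisfies P
lemma rn_foldl_values_P {α : Type} (P : α → Prop) (v : Int → α) :
    ∀ (srcs : List Int), (∀ h ∈ srcs, P (v h)) →
    ∀ (d : PySem.Dict Int α), (∀ kn ∈ d.items, P kn.2) →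
    ∀ kn ∈ (srcs.foldl (fun rv h => rv.insert h (v h)) d).items, P kn.2
  | [], _, d, hd => hd
  | s :: srcs, hP, d, hd => by
      rw [List.foldl_cons]
      refine rn_foldl_values_P P v srcs (fun h hh => hP h (by simp [hh])) _ ?_
      intro kn hkn
      rcases (PySem.Dict.mem_items_insert _ _ _ kn).1 hkn with h1 | h2
      · subst h1; exact hP s (by simp)
      · exact hd kn h2.1

-- the second (building) loop of A over the reached dict, with distinct keys, is a map
lemma rn_outer_eq (N : List (Int × List Int)) (reached : PySem.Dict Int (PySem.Set Int))
    (hnd : reached.keys.Nodup) :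
    (reached.items.foldl
      (fun rv kn => rv.insert kn.1 ((kn.2.foldl (fun d m => d.insert m (rn_get N m)) PySem.Dict.empty).items))
      (PySem.Dict.empty : PySem.Dict Int (List (Int × List Int)))).items
    = reached.items.map (fun kn =>
        (kn.1, (kn.2.foldl (fun d m => d.insert m (rn_get N m)) PySem.Dict.empty).items)) := by
  rw [PySem.Dict.items_foldl_insert_fresh _ _ _ _ (fun a _ => PySem.Dict.contains_empty _)
    (by simpa [PySem.Dict.keys] using hnd)]
  simp [rn_empty_items]

-- per-source agreement: under the acyclicity hypothesis at h, B's fused subnetwork dict carries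
-- exactly A's reach set mapped through m ↦ (m, N.get(m, []))
lemma rn_per_source_nt (N : List (Int × List Int)) (h : Int)
    (hacyc : ∀ x ∈ pvCl N none [h], x ∉ pvCl N none (PySem.Set.ofList (pvSucc N none x))) :
    (rnb_level N PySem.Set.empty (rn_fuel N) [h] PySem.Dict.empty).items
      = (rn_bfs_nt N (rn_fuel N) [h] PySem.Set.empty).map (fun m => (m, rn_get N m)) := by
  rw [rnb_level_eq_foldl N PySem.Set.empty (rn_fuel N) [h] PySem.Dict.empty, suxB_none N]
  rw [rn_foldl_insert_items N (lvlSeq (pvSucc N none) (rn_fuel N) [h]) [] PySem.Dict.empty rfl]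
  rw [bfs_nt_eq_bfsU N (rn_fuel N) [h] PySem.Set.empty,
    bfsU_fuel_eq N none h hacyc]
  rfl

lemma rn_per_source_t (N : List (Int × List Int)) (ts : List Int) (h : Int)
    (hacyc : ∀ x ∈ pvCl N (some ts) [h],
      x ∉ pvCl N (some ts) (PySem.Set.ofList (pvSucc N (some ts) x))) :
    (rnb_level N (PySem.Set.ofList ts) (rn_fuel N) [h] PySem.Dict.empty).items
      = (rn_bfs_t N (PySem.Set.ofList ts) (rn_fuel N) [h] PySem.Set.empty).map
          (fun m => (m, rn_get N m)) := by
  rw [rnb_level_eq_foldl N (PySem.Set.ofList ts) (rn_fuel N) [h] PySem.Dict.empty, suxB_some N ts]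
  rw [rn_foldl_insert_items N (lvlSeq (pvSucc N (some ts)) (rn_fuel N) [h]) [] PySem.Dict.empty rfl]
  rw [bfs_t_eq_bfsU N ts (rn_fuel N) [h] PySem.Set.empty,
    bfsU_fuel_eq N (some ts) h hacyc]
  rfl

-- generic outer glue: A's reached-then-build pipeline equals B's fused fold, given per-source
-- agreement and duplicate-freeness of the per-source reach lists
lemma rn_core (N : List (Int × List Int)) (srcs : List Int) (bfs : Int → PySem.Set Int)
    (tset : PySem.Set Int)
    (hper : ∀ h ∈ srcs, (rnb_level N tset (rn_fuel N) [h] PySem.Dict.empty).items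
        = (bfs h).map (fun m => (m, rn_get N m)))
    (hnd : ∀ h ∈ srcs, (bfs h).Nodup) :
    ((srcs.foldl (fun rv h => rv.insert h (bfs h)) PySem.Dict.empty).items.foldl
      (fun rv kn => rv.insert kn.1 ((kn.2.foldl (fun d m => d.insert m (rn_get N m)) PySem.Dict.empty).items))
      (PySem.Dict.empty : PySem.Dict Int (List (Int × List Int)))).items
    = (srcs.foldl (fun rv h => rv.insert h (rnb_level N tset (rn_fuel N) [h] PySem.Dict.empty).items)
        (PySem.Dict.empty : PySem.Dict Int (List (Int × List Int)))).items := by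
  rw [rn_outer_eq N _ (PySem.Dict.nodup_keys_foldl_insert _ _ _ PySem.Dict.nodup_keys_empty),
    rn_foldl_insert_w (fun n => n.map (fun m => (m, rn_get N m)))
      (fun h => (rnb_level N tset (rn_fuel N) [h] PySem.Dict.empty).items)
      bfs srcs hper PySem.Dict.empty PySem.Dict.empty rfl]
  apply List.map_congr_left
  intro kn hkn
  have hnod : kn.2.Nodup := rn_foldl_values_P (fun n => n.Nodup) bfs srcs hnd
    PySem.Dict.empty (fun kn h => by cases h) kn hkn
  rw [rn_inner_items N kn.2 hnod]

theorem rn_main_eq (N : List (Int × List Int)) (sources : Option (List Int))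
    (targets : Option (List Int)) (check_disjoint : Bool)
    (hacyc : ∀ h ∈ pvSrcs N sources, ∀ x ∈ pvCl N targets [h],
      x ∉ pvCl N targets (PySem.Set.ofList (pvSucc N targets x))) :
    reachable_network N sources targets check_disjoint
      = reachable_network_alt N sources targets check_disjoint := by
  cases targets with
  | none =>
      cases sources with
      | none =>
          exact rn_core N (rn_headwaters N)
            (fun h => rn_bfs_nt N (rn_fuel N) [h] PySem.Set.empty) PySem.Set.empty
            (fun h hh => rn_per_source_nt N h (hacyc h hh))
            (fun h _ => rn_bfs_nt_nodup N (rn_fuel N) [h] PySem.Set.empty List.nodup_nil)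
      | some s =>
          exact rn_core N s
            (fun h => rn_bfs_nt N (rn_fuel N) [h] PySem.Set.empty) PySem.Set.empty
            (fun h hh => rn_per_source_nt N h (hacyc h hh))
            (fun h _ => rn_bfs_nt_nodup N (rn_fuel N) [h] PySem.Set.empty List.nodup_nil)
  | some ts =>
      cases sources with
      | none =>
          exact rn_core N (rn_headwaters N)
            (fun h => rn_bfs_t N (PySem.Set.ofList ts) (rn_fuel N) [h] PySem.Set.empty)
            (PySem.Set.ofList ts)
            (fun h hh => rn_per_source_t N ts h (hacyc h hh))
            (fun h _ => rn_bfs_t_nodup N (PySem.Set.ofList ts) (rn_fuel N) [h] PySem.Set.empty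
              List.nodup_nil)
      | some s =>
          exact rn_core N s
            (fun h => rn_bfs_t N (PySem.Set.ofList ts) (rn_fuel N) [h] PySem.Set.empty)
            (PySem.Set.ofList ts)
            (fun h hh => rn_per_source_t N ts h (hacyc h hh))
            (fun h _ => rn_bfs_t_nodup N (PySem.Set.ofList ts) (rn_fuel N) [h] PySem.Set.empty
              List.nodup_nil)

-- ===== VERDICT (by name: the statement is the Claim_ definition above) =====
theorem reachable_network_spec : Claim_equal_reachable_network := by
  intro N sources targets check_disjoint _ hpre
  unfold Spec_reachable_network
  exact rn_main_eq N sources targets check_disjoint hpre.1
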